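-- pv_equiv track=rewrite | github.com/Ciastelix/Python-Algorithms | recursion/combinations.py | combinations_helper
-- ===== SOURCE A (Python) =====
-- def combinations_helper(
--     n: int, current: list[int], available: list[bool]
-- ) -> list[list[int]]:
--     if len(current) == 2 * n:
--         return [current]
--
--     result = []
--     for i in range(1, n + 1):
--         if available[i]:
--             idx = len(current)
--             if idx - i - 1 >= 0 and current[idx - i - 1] == i:
--                 available[i] = False
--                 next_current = current + [i]
--                 result += combinations_helper(n, next_current, available)
--                 available[i] = True
--
--     return result
-- ===== SOURCE B (Python) =====
-- def combinations_helper(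
--     n: int, current: list[int], available: list[bool]
-- ) -> list[list[int]]:
--     finished = []
--     frontier = [(current, available[:])]
--     while frontier:
--         next_frontier = []
--         for cur, av in frontier:
--             if len(cur) == 2 * n:
--                 finished.append(cur)
--             else:
--                 idx = len(cur)
--                 for i in range(1, n + 1):
--                     if av[i] and idx - i - 1 >= 0 and cur[idx - i - 1] == i:
--                         nav = av[:]
--                         nav[i] = False
--                         next_frontier.append((cur + [i], nav))
--         frontier = next_frontier
--     return finished
-- ===== Notes on version B (the rewrite author's own statement) =====
-- stated objective: alternative
-- what changed: A's recursive backtracking DFS with mutate-and-restore of `available` is replaced by an iterative breadth-first search: a frontier of (current, copied-availability) frames is expanded level by level, which yields the same result list because every solution sits at the same depth and per-level expansion preserves left-to-right order.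
import Mathlib
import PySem

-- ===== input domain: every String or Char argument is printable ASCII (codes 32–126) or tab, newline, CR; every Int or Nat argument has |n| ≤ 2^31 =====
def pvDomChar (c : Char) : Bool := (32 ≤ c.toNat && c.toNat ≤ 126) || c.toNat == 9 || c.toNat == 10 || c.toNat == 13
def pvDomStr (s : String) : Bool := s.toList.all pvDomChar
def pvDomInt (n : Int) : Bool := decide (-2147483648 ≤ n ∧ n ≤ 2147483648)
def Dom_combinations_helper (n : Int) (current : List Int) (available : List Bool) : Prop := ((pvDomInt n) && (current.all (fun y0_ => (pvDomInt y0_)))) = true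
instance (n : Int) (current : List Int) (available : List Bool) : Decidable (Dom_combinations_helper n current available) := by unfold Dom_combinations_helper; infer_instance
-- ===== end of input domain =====

-- B replaces A's recursive backtracking (mutate/restore of `available`) by an iterative
-- breadth-first frontier search with a copied availability vector per frame; same return
-- value (A's mutation of `available` is always undone before A returns), objective: alternative.

-- termination helper (used by both ports' recursions, cited by name in decreasing_by)
theorem pv_count_set_false (av : List Bool) (k : Nat) (h : av[k]? = some true) :
    (av.set k false).count true < av.count true := by
  induction av generalizing k with
  | nil => simp at h
  | cons b t ih =>
    cases k with
    | zero =>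
      simp at h
      subst h
      simp
    | succ k =>
      simp at h
      have := ih k h
      cases b <;> simp <;> omega

-- ===== PORT A =====
-- A's `for i in range(1, n + 1)` is ported as recursion over the Nat list
-- List.range' 1 n.toNat = [1, …, n] (the same iteration values, all ≥ 1, so the Nat
-- index `available[k]?` is exact for Python's `available[i]`; `none` = IndexError,
-- excluded by Pre_).  `available[i] = False … = True` (mutate then restore) becomes
-- passing `available.set k false` to the recursive call and keeping `available`
-- unchanged for the remaining iterations — exactly the list the Python recursion sees.
mutual
def combinations_helper (n : Int) (current : List Int) (available : List Bool) : List (List Int) :=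
  if (current.length : Int) = 2 * n then [current]
  else chAFor n current available (List.range' 1 n.toNat) []
termination_by (available.count true, 1, 0)

def chAFor (n : Int) (current : List Int) (available : List Bool) (ks : List Nat)
    (result : List (List Int)) : List (List Int) :=
  match ks with
  | [] => result
  | k :: rest =>
    match h : available[k]? with
    | some true =>
      if 0 ≤ (current.length : Int) - (k : Int) - 1 ∧
          PySem.List.pyGet? current ((current.length : Int) - (k : Int) - 1) = some (k : Int) then
        chAFor n current available rest
          (result ++ combinations_helper n (current ++ [(k : Int)]) (available.set k false))
      else
        chAFor n current available rest result
    | _ => chAFor n current available rest result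
termination_by (available.count true, 0, ks.length)
decreasing_by
  all_goals first
  | exact Prod.Lex.left _ _ (pv_count_set_false available k h)
  | exact Prod.Lex.right _ (Prod.Lex.right _ (Nat.lt_succ_self _))
end

-- ===== PORT B =====
-- one inner `for i in range(1, n+1)` pass of B: the children pushed for one frame
def chBChildren (n : Int) (cur : List Int) (av : List Bool) (ks : List Nat) :
    List (List Int × List Bool) :=
  match ks with
  | [] => []
  | k :: rest =>
    if av[k]? = some true ∧ 0 ≤ (cur.length : Int) - (k : Int) - 1 ∧
        PySem.List.pyGet? cur ((cur.length : Int) - (k : Int) - 1) = some (k : Int) then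
      (cur ++ [(k : Int)], av.set k false) :: chBChildren n cur av rest
    else chBChildren n cur av rest

-- one iteration of B's while loop over the whole frontier: (newly finished, next_frontier)
def chBLevel (n : Int) (frontier : List (List Int × List Bool)) :
    List (List Int) × List (List Int × List Bool) :=
  match frontier with
  | [] => ([], [])
  | (cur, av) :: rest =>
    let p := chBLevel n rest
    if (cur.length : Int) = 2 * n then (cur :: p.1, p.2)
    else (p.1, chBChildren n cur av (List.range' 1 n.toNat) ++ p.2)

-- termination measure for B's while loop
def pvMaxCount (fr : List (List Int × List Bool)) : Nat :=
  fr.foldr (fun f m => max (f.2.count true) m) 0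

theorem pv_children_count (n : Int) (cur : List Int) (av : List Bool) (ks : List Nat)
    (c : List Int × List Bool) (h : c ∈ chBChildren n cur av ks) :
    c.2.count true < av.count true := by
  induction ks with
  | nil => simp [chBChildren] at h
  | cons k rest ih =>
    rw [chBChildren] at h
    split at h
    · rcases List.mem_cons.1 h with h | h
      · subst h
        exact pv_count_set_false av k (by tauto)
      · exact ih h
    · exact ih h

theorem pv_le_maxCount (fr : List (List Int × List Bool)) (f : List Int × List Bool)
    (h : f ∈ fr) : f.2.count true ≤ pvMaxCount fr := by
  induction fr with
  | nil => simp at h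
  | cons g rest ih =>
    rcases List.mem_cons.1 h with h | h
    · subst h; exact Nat.le_max_left _ _
    · exact le_trans (ih h) (Nat.le_max_right _ _)

theorem pv_level_mem (n : Int) (fr : List (List Int × List Bool)) (c : List Int × List Bool)
    (h : c ∈ (chBLevel n fr).2) : ∃ p ∈ fr, c.2.count true < p.2.count true := by
  induction fr with
  | nil => simp [chBLevel] at h
  | cons g rest ih =>
    obtain ⟨cur, av⟩ := g
    rw [chBLevel] at h
    split at h
    · obtain ⟨p, hp, hlt⟩ := ih h
      exact ⟨p, List.mem_cons_of_mem _ hp, hlt⟩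
    · rcases List.mem_append.1 h with h | h
      · exact ⟨(cur, av), List.mem_cons_self, pv_children_count n cur av _ c h⟩
      · obtain ⟨p, hp, hlt⟩ := ih h
        exact ⟨p, List.mem_cons_of_mem _ hp, hlt⟩

theorem pv_maxCount_lt (fr : List (List Int × List Bool)) (m : Nat) (hm : 0 < m)
    (h : ∀ c ∈ fr, c.2.count true < m) : pvMaxCount fr < m := by
  induction fr with
  | nil => simpa [pvMaxCount] using hm
  | cons g rest ih =>
    have : pvMaxCount (g :: rest) = max (g.2.count true) (pvMaxCount rest) := rfl
    rw [this]
    exact Nat.max_lt.2 ⟨h g (List.mem_cons_self), ih fun c hc => h c (List.mem_cons_of_mem _ hc)⟩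

theorem pv_measure (n : Int) (fr : List (List Int × List Bool)) (hne : fr ≠ []) :
    Prod.Lex (· < ·) (· < ·) (pvMaxCount (chBLevel n fr).2, (chBLevel n fr).2.length)
      (pvMaxCount fr, fr.length) := by
  by_cases hn : (chBLevel n fr).2 = []
  · rw [hn]
    by_cases hm : pvMaxCount fr = 0
    · rw [show pvMaxCount ([] : List (List Int × List Bool)) = 0 from rfl, ← hm]
      refine Prod.Lex.right _ ?_
      cases fr
      · exact absurd rfl hne
      · exact Nat.succ_pos _
    · refine Prod.Lex.left _ _ ?_
      have h0 : pvMaxCount ([] : List (List Int × List Bool)) = 0 := rfl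
      omega
  · refine Prod.Lex.left _ _ ?_
    obtain ⟨c, hc⟩ := List.exists_mem_of_ne_nil _ hn
    obtain ⟨p, hp, _⟩ := pv_level_mem n fr c hc
    refine pv_maxCount_lt _ _ ?_ ?_
    · obtain ⟨q, hq, hcq⟩ := pv_level_mem n fr c hc
      have := pv_le_maxCount fr q hq
      omega
    · intro d hd
      obtain ⟨q, hq, hdq⟩ := pv_level_mem n fr d hd
      have := pv_le_maxCount fr q hq
      omega

-- B's while loop
def chBLoop (n : Int) (finished : List (List Int)) (frontier : List (List Int × List Bool)) :
    List (List Int) :=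
  match frontier with
  | [] => finished
  | f :: rest =>
    chBLoop n (finished ++ (chBLevel n (f :: rest)).1) (chBLevel n (f :: rest)).2
termination_by (pvMaxCount frontier, frontier.length)
decreasing_by exact pv_measure n (f :: rest) (by simp)

def combinations_helper_alt (n : Int) (current : List Int) (available : List Bool) :
    List (List Int) :=
  chBLoop n [] [(current, available)]

-- ===== PRECONDITION & SPEC =====
-- Pre_ excludes exactly the inputs on which Python A raises IndexError: the loop body
-- runs (len(current) ≠ 2n and n ≥ 1) while available is shorter than n+1.
def Pre_combinations_helper (n : Int) (current : List Int) (available : List Bool) : Prop :=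
  (current.length : Int) = 2 * n ∨ n < 1 ∨ n + 1 ≤ (available.length : Int)
instance (n : Int) (current : List Int) (available : List Bool) :
    Decidable (Pre_combinations_helper n current available) := by
  unfold Pre_combinations_helper; infer_instance

def pvWitness_combinations_helper : Int × List Int × List Bool := (2, [2, 0, 0], [true, true, true])

def Spec_combinations_helper (n : Int) (current : List Int) (available : List Bool) (out : List (List Int)) : Prop := out = combinations_helper_alt n current available
instance (n : Int) (current : List Int) (available : List Bool) (out : List (List Int)) : Decidable (Spec_combinations_helper n current available out) := by unfold Spec_combinations_helper; infer_instance

-- ===== CLAIM (what is proved, stated in full; the proofs are below) =====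
def Claim_equal_combinations_helper : Prop := ∀ (n : Int) (current : List Int) (available : List Bool), Dom_combinations_helper n current available → Pre_combinations_helper n current available → Spec_combinations_helper n current available (combinations_helper n current available)

-- ===== LEMMAS AND PROOFS =====

theorem chAFor_eq (n : Int) (cur : List Int) (av : List Bool) (ks : List Nat)
    (res : List (List Int)) :
    chAFor n cur av ks res =
      res ++ (chBChildren n cur av ks).flatMap (fun c => combinations_helper n c.1 c.2) := by
  induction ks generalizing res with
  | nil => simp [chAFor, chBChildren]
  | cons k rest ih =>
    rw [chAFor, chBChildren]
    cases hav : av[k]? with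
    | none =>
      simp only [hav]
      rw [if_neg (fun hcontra => by simp at hcontra), ih]
    | some b =>
      cases b with
      | false =>
        simp only [hav]
        rw [if_neg (fun hcontra => by simp at hcontra), ih]
      | true =>
        by_cases hc : 0 ≤ (cur.length : Int) - (k : Int) - 1 ∧
            PySem.List.pyGet? cur ((cur.length : Int) - (k : Int) - 1) = some (k : Int)
        · rw [if_pos hc, if_pos ⟨rfl, hc⟩, ih, List.flatMap_cons, List.append_assoc]
        · rw [if_neg hc, if_neg (fun h => hc h.2), ih]

theorem chA_children (n : Int) (cur : List Int) (av : List Bool)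
    (hne : (cur.length : Int) ≠ 2 * n) :
    combinations_helper n cur av =
      (chBChildren n cur av (List.range' 1 n.toNat)).flatMap
        (fun c => combinations_helper n c.1 c.2) := by
  rw [combinations_helper, if_neg hne, chAFor_eq]
  simp

theorem chA_done (n : Int) (cur : List Int) (av : List Bool)
    (h : (cur.length : Int) = 2 * n) : combinations_helper n cur av = [cur] := by
  rw [combinations_helper, if_pos h]

theorem chBLevel_done (n : Int) (fr : List (List Int × List Bool))
    (h : ∀ f ∈ fr, ((f.1.length : Int) = 2 * n)) :
    chBLevel n fr = (fr.map Prod.fst, []) := by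
  induction fr with
  | nil => rfl
  | cons g rest ih =>
    obtain ⟨cur, av⟩ := g
    rw [chBLevel]
    rw [if_pos (h (cur, av) (List.mem_cons_self)),
      ih fun f hf => h f (List.mem_cons_of_mem _ hf)]
    simp

theorem chBLevel_step (n : Int) (fr : List (List Int × List Bool))
    (h : ∀ f ∈ fr, ((f.1.length : Int) ≠ 2 * n)) :
    chBLevel n fr =
      ([], fr.flatMap fun f => chBChildren n f.1 f.2 (List.range' 1 n.toNat)) := by
  induction fr with
  | nil => rfl
  | cons g rest ih =>
    obtain ⟨cur, av⟩ := g
    rw [chBLevel]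
    rw [if_neg (h (cur, av) (List.mem_cons_self)),
      ih fun f hf => h f (List.mem_cons_of_mem _ hf)]
    simp

theorem chBChildren_len (n : Int) (cur : List Int) (av : List Bool) (ks : List Nat)
    (c : List Int × List Bool) (h : c ∈ chBChildren n cur av ks) :
    c.1.length = cur.length + 1 := by
  induction ks with
  | nil => simp [chBChildren] at h
  | cons k rest ih =>
    rw [chBChildren] at h
    split at h
    · rcases List.mem_cons.1 h with h | h
      · subst h; simp
      · exact ih h
    · exact ih h

theorem flatMap_chA_done (n : Int) (l : List (List Int × List Bool))
    (h : ∀ f ∈ l, ((f.1.length : Int) = 2 * n)) :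
    (l.flatMap fun f => combinations_helper n f.1 f.2) = l.map Prod.fst := by
  induction l with
  | nil => rfl
  | cons g rest ih =>
    rw [List.flatMap_cons, chA_done n g.1 g.2 (h g List.mem_cons_self),
      ih fun f hf => h f (List.mem_cons_of_mem _ hf)]
    rfl

theorem flatMap_congr_mem' {α β : Type} (l : List α) (f g : α → List β)
    (h : ∀ x ∈ l, f x = g x) : l.flatMap f = l.flatMap g := by
  induction l with
  | nil => rfl
  | cons a rest ih =>
    rw [List.flatMap_cons, List.flatMap_cons, h a List.mem_cons_self,
      ih fun x hx => h x (List.mem_cons_of_mem _ hx)]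

theorem chBLoop_eq (n : Int) (finished : List (List Int))
    (frontier : List (List Int × List Bool))
    (h : ∃ L : Nat, ∀ f ∈ frontier, f.1.length = L) :
    chBLoop n finished frontier =
      finished ++ frontier.flatMap (fun f => combinations_helper n f.1 f.2) := by
  induction finished, frontier using chBLoop.induct n with
  | case1 finished => simp [chBLoop]
  | case2 finished f rest ih =>
    obtain ⟨L, hL⟩ := h
    by_cases hL2 : (L : Int) = 2 * n
    · have hall : ∀ g ∈ f :: rest, ((g.1.length : Int) = 2 * n) := by
        intro g hg; rw [hL g hg]; exact hL2
      rw [chBLoop, ih ⟨0, by simp [chBLevel_done n _ hall]⟩, chBLevel_done n _ hall,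
        flatMap_chA_done n _ hall]
      simp
    · have hall : ∀ g ∈ f :: rest, ((g.1.length : Int) ≠ 2 * n) := by
        intro g hg; rw [hL g hg]; exact hL2
      have hnext : ∃ L' : Nat, ∀ c ∈ (chBLevel n (f :: rest)).2, c.1.length = L' := by
        rw [chBLevel_step n _ hall]
        refine ⟨L + 1, ?_⟩
        intro c hc
        simp only [List.mem_flatMap] at hc
        obtain ⟨g, hg, hcg⟩ := hc
        rw [chBChildren_len n g.1 g.2 _ c hcg, hL g hg]
      rw [chBLoop, ih hnext, chBLevel_step n _ hall]
      simp only [List.append_nil, List.flatMap_assoc]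
      congr 1
      exact flatMap_congr_mem' _ _ _ fun g hg =>
        (chA_children n g.1 g.2 (hall g hg)).symm

-- ===== VERDICT (by name: the statement is the Claim_ definition above) =====
theorem combinations_helper_spec : Claim_equal_combinations_helper := by
  intro n current available _ _
  unfold Spec_combinations_helper combinations_helper_alt
  rw [chBLoop_eq n [] [(current, available)] ⟨current.length, by simp⟩]
  simp
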